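-- pv_equiv track=rewrite | github.com/LBNL-HEP-QIS/QuantumPartonShower | main.py | generateGrayList
-- ===== SOURCE A (Python) =====
-- def reverse(lst):
--     """reverse a list in place"""
--     lst.reverse()
--     return lst
--
-- def intToBinary(l, number):
--     """Converts integer to binary list of size l with LSB first and MSB last"""
--     numberBinary = [int(x) for x in list('{0:0b}'.format(number))]
--     numberBinary = (l - len(numberBinary)) * [0] + numberBinary
--     return reverse(numberBinary)
--
-- def generateGrayList(l, number):
--     """
--     l is the size of the current count register
--     Return list of elements in gray code from |0> to |number> where each entry is of type[int, binary list].
--     int: which bit is the target in the current iteration, binary list: the state of the rest of the qubits (controls)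
--     """
--     grayList = [[0, l * [0]]]
--     targetBinary = intToBinary(l, number)
--     for index in range(len(targetBinary)):
--         if targetBinary[index] == 1:
--             grayList.append([index, (list(grayList[-1][1]))])
--             grayList[-1][1][index] = 1
--     return grayList[1:]
-- ===== SOURCE B (Python) =====
-- def reverse(lst):
--     """reverse a list in place"""
--     lst.reverse()
--     return lst
--
-- def intToBinary(l, number):
--     """Converts integer to binary list of size l with LSB first and MSB last"""
--     numberBinary = [int(x) for x in list('{0:0b}'.format(number))]
--     numberBinary = (l - len(numberBinary)) * [0] + numberBinary
--     return reverse(numberBinary)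
--
-- def generateGrayList(l, number):
--     """Per-entry reconstruction: collect the set-bit positions (LSB first), then
--     build each control state directly from the prefix of those positions."""
--     targetBinary = intToBinary(l, number)
--     idxs = [i for i in range(len(targetBinary)) if targetBinary[i] == 1]
--     out = []
--     for k, idx in enumerate(idxs):
--         state = l * [0]
--         for j in idxs[:k + 1]:
--             state[j] = 1
--         out.append([idx, state])
--     return out
-- ===== Notes on version B (the rewrite author's own statement) =====
-- stated objective: alternative
-- what changed: B replaces A's binary-string formatting plus incremental copy-the-previous-state-and-flip accumulator with bit-shift extraction of the set-bit positions and independent reconstruction of each control state from the prefix of those positions.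
import Mathlib
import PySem

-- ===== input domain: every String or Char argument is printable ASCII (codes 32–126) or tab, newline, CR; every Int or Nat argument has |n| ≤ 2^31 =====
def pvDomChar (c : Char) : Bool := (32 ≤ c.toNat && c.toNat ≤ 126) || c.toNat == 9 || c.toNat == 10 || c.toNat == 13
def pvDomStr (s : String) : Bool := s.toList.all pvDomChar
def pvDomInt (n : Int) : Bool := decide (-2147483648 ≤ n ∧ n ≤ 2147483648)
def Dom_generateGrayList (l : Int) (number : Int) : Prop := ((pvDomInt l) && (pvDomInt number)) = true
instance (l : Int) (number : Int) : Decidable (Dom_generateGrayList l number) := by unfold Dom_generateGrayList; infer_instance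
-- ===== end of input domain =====

-- B replaces A's incremental copy-the-previous-state-and-flip accumulator with
-- independent per-entry reconstruction from the prefix of set-bit positions (objective: alternative decomposition).

-- ===== PORT A =====
-- hand port of '{0:0b}'.format(n): binary digits MSB first; exact for n ≥ 0
-- (Python raises ValueError for negative number inside intToBinary; excluded by Pre_)
def pvBinMSB (n : Nat) : List Int :=
  if _h : n < 2 then [(n : Int)]
  else pvBinMSB (n / 2) ++ [((n % 2 : Nat) : Int)]
decreasing_by omega

def pvIntToBinary (l : Int) (number : Int) : List Int :=
  let numberBinary := pvBinMSB number.toNat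
  let numberBinary := List.replicate (l - (numberBinary.length : Int)).toNat 0 ++ numberBinary
  numberBinary.reverse

def generateGrayList (l : Int) (number : Int) : List (Int × List Int) :=
  let targetBinary := pvIntToBinary l number
  let grayList := (List.range targetBinary.length).foldl
    (fun grayList index =>
      if targetBinary.getD index 0 = 1 then
        -- append a copy of the last state, then set bit `index` (in range under Pre_)
        grayList ++ [((index : Int), ((grayList.getLastD ((0:Int), [])).2).set index 1)]
      else grayList)
    [((0:Int), List.replicate l.toNat (0:Int))]
  grayList.drop 1

-- ===== PORT B =====
def generateGrayList_alt (l : Int) (number : Int) : List (Int × List Int) :=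
  let targetBinary := pvIntToBinary l number
  let idxs := (List.range targetBinary.length).filter (fun i => targetBinary.getD i 0 == 1)
  -- for k, idx in enumerate(idxs): rebuild state from idxs[:k+1] and append
  (PySem.List.enumerate (idxs.map (fun i => Int.ofNat i)) 0).foldl
    (fun out ki =>
      out ++ [(ki.2,
        -- state = l*[0]; state[j] = 1 for j in idxs[:k+1] (j in range under Pre_)
        ((idxs.map (fun i => Int.ofNat i)).take (ki.1 + 1).toNat).foldl
          (fun state j => state.set j.toNat 1) (List.replicate l.toNat (0:Int)))])
    []

-- ===== PRECONDITION & SPEC =====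
-- Exactly the inputs on which Python A returns: a negative number raises ValueError in
-- intToBinary, and number ≥ 2^l (for number > 0) raises IndexError setting a bit past the register.
def Pre_generateGrayList (l : Int) (number : Int) : Prop :=
  0 ≤ number ∧ (number = 0 ∨ (0 < l ∧ number < 2 ^ l.toNat))
instance (l : Int) (number : Int) : Decidable (Pre_generateGrayList l number) := by
  unfold Pre_generateGrayList; infer_instance
def pvWitness_generateGrayList : Int × Int := (3, 5)

def Spec_generateGrayList (l : Int) (number : Int) (out : List (Int × List Int)) : Prop := out = generateGrayList_alt l number
instance (l : Int) (number : Int) (out : List (Int × List Int)) : Decidable (Spec_generateGrayList l number out) := by unfold Spec_generateGrayList; infer_instance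

-- ===== CLAIM (what is proved, stated in full; the proofs are below) =====
def Claim_equal_generateGrayList : Prop := ∀ (l : Int) (number : Int), Dom_generateGrayList l number → Pre_generateGrayList l number → Spec_generateGrayList l number (generateGrayList l number)

-- ===== LEMMAS AND PROOFS =====

-- canonical middle form: set-bit positions and prefix-indicator states
def pvIdxs (L n : Nat) : List Nat := (List.range L).filter (fun i => n.testBit i)

def pvState (L : Nat) (js : List Nat) : List Int :=
  (List.range L).map (fun j => if j ∈ js then (1:Int) else 0)

def pvEntries (L : Nat) (pre js : List Nat) : List (Int × List Int) :=
  match js with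
  | [] => []
  | j :: rest => ((j : Int), pvState L (pre ++ [j])) :: pvEntries L (pre ++ [j]) rest

lemma pvBinMSB_reverse_getD (n : Nat) :
    ∀ i, (pvBinMSB n).reverse.getD i 0 = if n.testBit i then (1:Int) else 0 := by
  induction n using Nat.strong_induction_on with
  | _ n ih =>
    intro i
    rw [pvBinMSB]
    by_cases h : n < 2
    · simp only [dif_pos h]
      match i with
      | 0 =>
        interval_cases n <;> simp
      | i + 1 =>
        interval_cases n <;> simp [Nat.testBit_succ]
    · simp only [dif_neg h, List.reverse_append]
      match i with
      | 0 =>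
        rw [Nat.testBit_zero]
        rcases Nat.mod_two_eq_zero_or_one n with h2 | h2 <;> simp [h2]
      | i + 1 =>
        simp only [List.reverse_singleton, List.singleton_append, List.getD_cons_succ]
        rw [ih (n / 2) (by omega) i, Nat.testBit_succ]

lemma pvBinMSB_length_le (n : Nat) : ∀ L, 1 ≤ n → n < 2 ^ L → (pvBinMSB n).length ≤ L := by
  induction n using Nat.strong_induction_on with
  | _ n ih =>
    intro L h1 h2
    rw [pvBinMSB]
    by_cases h : n < 2
    · have : n = 1 := by omega
      subst this
      have : 0 < L := by
        by_contra hL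
        have : L = 0 := by omega
        subst this; simp at h2
      simp; omega
    · have hL : 1 ≤ L := by
        by_contra hL
        have : L = 0 := by omega
        subst this; simp at h2; omega
      have hrec := ih (n / 2) (by omega) (L - 1) (by omega) (by
        have : 2 ^ L = 2 ^ (L - 1) * 2 := by
          rw [← pow_succ]; congr 1; omega
        omega)
      simp only [dif_neg h, List.length_append, List.length_singleton]
      omega

lemma pvGetD_append_replicate (xs : List Int) (p i : Nat) :
    (xs ++ List.replicate p (0:Int)).getD i 0 = xs.getD i 0 := by
  by_cases h : i < xs.length
  · rw [List.getD_eq_getElem?_getD, List.getD_eq_getElem?_getD,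
      List.getElem?_append_left h]
  · rw [List.getD_eq_getElem?_getD, List.getD_eq_getElem?_getD]
    rw [List.getElem?_append_right (by omega)]
    rcases Nat.lt_or_ge (i - xs.length) p with hp | hp
    · simp [hp, List.getElem?_eq_none (by omega : xs.length ≤ i)]
    · simp [List.getElem?_eq_none (by omega : xs.length ≤ i),
        List.getElem?_eq_none (by simpa using hp : (List.replicate p (0:Int)).length ≤ i - xs.length)]

lemma pvTb_getD (l : Int) (number : Int) :
    ∀ i, (pvIntToBinary l number).getD i 0
      = if number.toNat.testBit i then (1:Int) else 0 := by
  intro i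
  unfold pvIntToBinary
  simp only [List.reverse_append, List.reverse_replicate]
  rw [pvGetD_append_replicate, pvBinMSB_reverse_getD]

lemma pvTb_length (l : Int) (number : Int) (h0 : 0 < number)
    (hl : 0 < l) (hlt : number < 2 ^ l.toNat) :
    (pvIntToBinary l number).length = l.toNat := by
  have hcast : ((2:Int) ^ l.toNat) = ((2 ^ l.toNat : Nat) : Int) := by push_cast; ring
  have hle := pvBinMSB_length_le number.toNat l.toNat (by omega) (by omega)
  unfold pvIntToBinary
  simp only [List.length_reverse, List.length_append, List.length_replicate]
  omega

lemma pvState_nil (L : Nat) : pvState L [] = List.replicate L (0:Int) := by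
  simp [pvState, List.map_const']

lemma pvState_set (L : Nat) (js : List Nat) (m : Nat) :
    (pvState L js).set m 1 = pvState L (js ++ [m]) := by
  unfold pvState
  apply List.ext_getElem
  · simp
  · intro i h1 h2
    simp only [List.getElem_set, List.getElem_map, List.getElem_range, List.mem_append,
      List.mem_singleton] at *
    by_cases hi : m = i
    · subst hi; simp
    · simp only [if_neg hi]
      have : ¬ i = m := fun h => hi h.symm
      simp [this]

lemma pvEntries_append (L : Nat) (js : List Nat) (m : Nat) :
    ∀ pre, pvEntries L pre (js ++ [m])
      = pvEntries L pre js ++ [((m : Int), pvState L (pre ++ js ++ [m]))] := by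
  induction js with
  | nil => intro pre; simp [pvEntries]
  | cons j rest ih =>
    intro pre
    simp only [List.cons_append, pvEntries, ih (pre ++ [j]), List.cons_append]
    simp [List.append_assoc]

lemma pvEntries_getLastD (L : Nat) (js : List Nat) :
    ∀ pre (c : Int × List Int), c.2 = pvState L pre →
      ((c :: pvEntries L pre js).getLastD ((0:Int), [])).2 = pvState L (pre ++ js) := by
  induction js with
  | nil => intro pre c hc; simpa [pvEntries] using hc
  | cons j rest ih =>
    intro pre c _hc
    have := ih (pre ++ [j]) ((j : Int), pvState L (pre ++ [j])) rfl
    simpa [pvEntries, List.append_assoc] using this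

lemma pvFold_spec (L n : Nat) (tb : List Int)
    (htb : ∀ i, tb.getD i 0 = if n.testBit i then (1:Int) else 0)
    (m : Nat) :
    (List.range m).foldl
      (fun grayList index =>
        if tb.getD index 0 = 1 then
          grayList ++ [((index : Int), ((grayList.getLastD ((0:Int), [])).2).set index 1)]
        else grayList)
      [((0:Int), List.replicate L (0:Int))]
    = ((0:Int), List.replicate L (0:Int)) :: pvEntries L [] (pvIdxs m n) := by
  induction m with
  | zero => simp [pvIdxs, pvEntries]
  | succ m ih =>
    rw [List.range_succ, List.foldl_append, ih]
    have hidx : pvIdxs (m + 1) n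
        = pvIdxs m n ++ (if n.testBit m then [m] else []) := by
      simp only [pvIdxs, List.range_succ, List.filter_append]
      congr 1
      by_cases h : n.testBit m <;> simp [h]
    by_cases hbit : n.testBit m
    · have hlast := pvEntries_getLastD L (pvIdxs m n) []
        ((0:Int), List.replicate L (0:Int)) (by simp [pvState_nil])
      rw [hidx, if_pos hbit, pvEntries_append]
      simp only [List.nil_append] at hlast
      simp only [List.foldl_cons, List.foldl_nil, htb m, hbit]
      simp
      rw [List.getLastD_eq_getLast?] at hlast
      rw [hlast, pvState_set]
    · simp only [List.foldl_cons, List.foldl_nil, htb m, if_neg hbit]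
      rw [hidx, if_neg hbit]
      simp

lemma pvB_entries (L : Nat) (all : List Nat) :
    ∀ (js pre : List Nat) (s : Int), all = pre ++ js → s = (pre.length : Int) →
      (PySem.List.enumerate (js.map (fun j => Int.ofNat j)) s).map
        (fun ki => (ki.2, pvState L (all.take (ki.1 + 1).toNat)))
      = pvEntries L pre js := by
  intro js
  induction js with
  | nil => intro pre s _ _; simp [pvEntries, PySem.List.enumerate_nil]
  | cons j rest ih =>
    intro pre s hall hs
    rw [List.map_cons, PySem.List.enumerate_cons, List.map_cons]
    unfold pvEntries
    congr 1
    · have htake : all.take (s + 1).toNat = pre ++ [j] := by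
        subst hall hs
        have : ((pre.length : Int) + 1).toNat = pre.length + 1 := by omega
        rw [this]
        rw [List.take_append]
        simp
      simp [htake]
    · exact ih (pre ++ [j]) (s + 1) (by simp [hall]) (by simp [hs])

lemma pvIdxs_zero (m : Nat) : pvIdxs m 0 = [] := by
  simp [pvIdxs]

lemma pvFoldAppend {α β : Type} (xs : List α) (f : α → β) :
    ∀ acc, xs.foldl (fun out x => out ++ [f x]) acc = acc ++ xs.map f := by
  induction xs with
  | nil => intro acc; simp
  | cons x rest ih => intro acc; simp [ih]

lemma pvSetFold (L : Nat) :
    ∀ (js pre : List Nat),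
      js.foldl (fun st j => st.set j 1) (pvState L pre) = pvState L (pre ++ js) := by
  intro js
  induction js with
  | nil => intro pre; simp
  | cons j rest ih =>
    intro pre
    simp only [List.foldl_cons, pvState_set, ih (pre ++ [j]), List.append_assoc,
      List.singleton_append]

lemma pvB_eq (l : Int) (number : Int) (h : Pre_generateGrayList l number) :
    generateGrayList_alt l number = pvEntries l.toNat [] (pvIdxs l.toNat number.toNat) := by
  obtain ⟨h0, hc⟩ := h
  unfold generateGrayList_alt
  dsimp only
  have hidxs : (List.range (pvIntToBinary l number).length).filter
        (fun i => (pvIntToBinary l number).getD i 0 == 1)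
      = pvIdxs l.toNat number.toNat := by
    have hcong : (List.range (pvIntToBinary l number).length).filter
          (fun i => (pvIntToBinary l number).getD i 0 == 1)
        = (List.range (pvIntToBinary l number).length).filter
          (fun i => number.toNat.testBit i) := by
      apply List.filter_congr
      intro i _
      rw [pvTb_getD l number i]
      by_cases hb : number.toNat.testBit i <;> simp [hb]
    rw [hcong]
    by_cases hz : number = 0
    · subst hz
      show pvIdxs _ 0 = pvIdxs _ 0
      rw [pvIdxs_zero, pvIdxs_zero]
    · rcases hc with h1 | ⟨hl, hlt⟩
      · exact absurd h1 hz
      · rw [pvTb_length l number (by omega) hl hlt]; rfl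
  rw [hidxs, pvFoldAppend, List.nil_append]
  rw [← pvB_entries l.toNat (pvIdxs l.toNat number.toNat)
      (pvIdxs l.toNat number.toNat) [] 0 (by simp) (by simp)]
  apply List.map_congr_left
  intro ki _
  congr 1
  rw [← List.map_take, List.foldl_map]
  have : (fun (st : List Int) (x : Nat) => st.set (Int.ofNat x).toNat 1)
      = fun st j => st.set j 1 := by
    funext st x
    simp
  rw [this, ← pvState_nil, pvSetFold]
  simp

lemma pvA_eq (l : Int) (number : Int) (h : Pre_generateGrayList l number) :
    generateGrayList l number = pvEntries l.toNat [] (pvIdxs l.toNat number.toNat) := by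
  obtain ⟨h0, hc⟩ := h
  unfold generateGrayList
  dsimp only
  rw [pvFold_spec l.toNat number.toNat (pvIntToBinary l number) (pvTb_getD l number)]
  rw [List.drop_succ_cons, List.drop_zero]
  congr 1
  by_cases hz : number = 0
  · subst hz
    simp [pvIdxs_zero]
  · rcases hc with h1 | ⟨hl, hlt⟩
    · exact absurd h1 hz
    · rw [pvTb_length l number (by omega) hl hlt]

-- ===== VERDICT (by name: the statement is the Claim_ definition above) =====
theorem generateGrayList_spec : Claim_equal_generateGrayList := by
  intro l number _hdom hpre
  unfold Spec_generateGrayList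
  rw [pvA_eq l number hpre, pvB_eq l number hpre]
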